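-- pv_equiv track=rewrite | github.com/foresense/evolver_tool | evolver.py | unpack_ms_bit
-- ===== SOURCE A (Python) =====
-- def unpack_ms_bit(packed_data: tuple) -> list:
--     data = []
--     for n, byte in enumerate(packed_data):
--         cycle = n % 8
--         if cycle == 0:
--             ms_bits = byte
--         else:
--             if ms_bits & (1 << (cycle - 1)):
--                 data.append(byte | 0x80)
--             else:
--                 data.append(byte)
--     return data
-- ===== SOURCE B (Python) =====
-- def unpack_ms_bit(packed_data: tuple) -> list:
--     data = []
--     for i in range(0, len(packed_data), 8):
--         chunk = packed_data[i:i + 8]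
--         mask = chunk[0]
--         for j, b in enumerate(chunk[1:]):
--             data.append(b | 0x80 if mask & (1 << j) else b)
--     return data
-- ===== Notes on version B (the rewrite author's own statement) =====
-- stated objective: simpler
-- what changed: Replaces the flat single pass that tracks n % 8 and a carried mask variable with an explicit nested traversal: slice the input into 8-byte chunks, take the chunk head as the mask, and map the remaining bytes of the chunk with enumerate.
import Mathlib
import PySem

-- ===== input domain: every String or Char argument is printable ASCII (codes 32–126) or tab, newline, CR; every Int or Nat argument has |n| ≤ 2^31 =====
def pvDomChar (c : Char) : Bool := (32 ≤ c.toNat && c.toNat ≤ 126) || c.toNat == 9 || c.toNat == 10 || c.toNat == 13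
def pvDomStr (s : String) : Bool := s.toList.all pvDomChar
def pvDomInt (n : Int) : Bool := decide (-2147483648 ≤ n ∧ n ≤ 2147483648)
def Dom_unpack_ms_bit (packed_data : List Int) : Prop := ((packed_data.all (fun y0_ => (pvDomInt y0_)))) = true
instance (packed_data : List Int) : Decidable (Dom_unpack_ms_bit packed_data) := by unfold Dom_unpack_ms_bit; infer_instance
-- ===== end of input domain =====

-- B re-reads the same unpacking as a nested chunk-of-8 traversal (slice + head mask + enumerate)
-- instead of A's flat pass carrying n % 8 and a mask variable; return values proved equal.

-- ===== PORT A =====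
-- loop body of A; state is (ms_bits, data); ms_bits is set at n % 8 == 0 before any read (dummy init 0)
def pvAstep (st : Int × List Int) (nb : Int × Int) : Int × List Int :=
  let cycle := PySem.Int.mod nb.1 8
  if cycle = 0 then (nb.2, st.2)
  else if PySem.Int.band st.1 ((1 : Int) <<< (cycle - 1).toNat) ≠ 0 then
    (st.1, st.2 ++ [PySem.Int.bor nb.2 128])
  else
    (st.1, st.2 ++ [nb.2])

def unpack_ms_bit (packed_data : List Int) : List Int :=
  ((PySem.List.enumerate packed_data 0).foldl pvAstep (0, [])).2

-- ===== PORT B =====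
-- outer-loop body of B: slice out one chunk, head is the mask, map the data bytes
def pvBstep (l : List Int) (data : List Int) (i : Int) : List Int :=
  let chunk := PySem.List.slice l (some i) (some (i + 8))
  match chunk with
  | [] => data   -- unreachable: i < len l, so the chunk is nonempty (Python's chunk[0])
  | mask :: rest =>
      data ++ (PySem.List.enumerate rest 0).map
        (fun jb =>
          if PySem.Int.band mask ((1 : Int) <<< jb.1.toNat) ≠ 0 then PySem.Int.bor jb.2 128
          else jb.2)

def unpack_ms_bit_alt (packed_data : List Int) : List Int :=
  (PySem.List.pyRange 0 packed_data.length 8).foldl (pvBstep packed_data) []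

-- ===== PRECONDITION & SPEC =====
def Spec_unpack_ms_bit (packed_data : List Int) (out : List Int) : Prop := out = unpack_ms_bit_alt packed_data
instance (packed_data : List Int) (out : List Int) : Decidable (Spec_unpack_ms_bit packed_data out) := by unfold Spec_unpack_ms_bit; infer_instance

-- ===== CLAIM (what is proved, stated in full; the proofs are below) =====
def Claim_equal_unpack_ms_bit : Prop := ∀ (packed_data : List Int), Dom_unpack_ms_bit packed_data → Spec_unpack_ms_bit packed_data (unpack_ms_bit packed_data)

-- ===== LEMMAS AND PROOFS =====

-- common specification: process a list knowing the current cycle position c (< 8) and mask ms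
def pvMaskByte (ms b : Int) (j : Nat) : Int :=
  if PySem.Int.band ms ((1 : Int) <<< j) ≠ 0 then PySem.Int.bor b 128 else b

def pvH : Nat → Int → List Int → List Int
  | _, _, [] => []
  | 0, _, b :: rest => pvH 1 b rest
  | (c+1), ms, b :: rest => pvMaskByte ms b c :: pvH ((c + 2) % 8) ms rest

theorem pvH_zero_ms (ms ms' : Int) (l : List Int) : pvH 0 ms l = pvH 0 ms' l := by
  cases l <;> simp [pvH]

theorem pv_mod8 (n : Int) : PySem.Int.mod n 8 = n % 8 := by
  simp [PySem.Int.mod, Int.fmod_eq_emod]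

theorem pvAstep_eq (st : Int × List Int) (n b : Int) :
    pvAstep st (n, b) =
      if n % 8 = 0 then (b, st.2)
      else if PySem.Int.band st.1 ((1 : Int) <<< (n % 8 - 1).toNat) ≠ 0 then
        (st.1, st.2 ++ [PySem.Int.bor b 128])
      else (st.1, st.2 ++ [b]) := by
  simp only [pvAstep, pv_mod8]


-- ---- A's fold equals pvH ----
theorem pvA_go (l : List Int) : ∀ (c : Nat) (n ms : Int) (data : List Int),
    c < 8 → n % 8 = (c : Int) →
    ((PySem.List.enumerate l n).foldl pvAstep (ms, data)).2 = data ++ pvH c ms l := by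
  induction l with
  | nil => intro c n ms data _ _; simp [PySem.List.enumerate_nil, pvH]
  | cons b t ih =>
    intro c n ms data hc hn
    rw [PySem.List.enumerate_cons, List.foldl_cons, pvAstep_eq, hn]
    match c with
    | 0 =>
      rw [if_pos (by norm_num)]
      rw [ih 1 (n+1) b data (by omega) (by omega)]
      simp [pvH]
    | (c'+1) =>
      have hne : ((c':Int) + 1) ≠ 0 := by omega
      have htn : (((c':Int) + 1) - 1).toNat = c' := by omega
      rw [show ((c'+1 : Nat) : Int) = (c':Int) + 1 by push_cast; ring, if_neg hne, htn]
      by_cases hb : PySem.Int.band ms ((1 : Int) <<< c') ≠ 0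
      · rw [if_pos hb,
          ih ((c' + 2) % 8) (n+1) ms (data ++ [PySem.Int.bor b 128]) (by omega) (by omega)]
        simp [pvH, pvMaskByte, hb]
      · rw [if_neg hb,
          ih ((c' + 2) % 8) (n+1) ms (data ++ [b]) (by omega) (by omega)]
        simp [pvH, pvMaskByte, hb]

-- ---- B side ----
theorem pvRange8_nil (a b : Int) (h : b ≤ a) : PySem.List.pyRange a b 8 = [] := by
  rw [PySem.List.pyRange_of_pos a b (by norm_num)]
  rw [if_neg (by omega)]
  simp

theorem pvRange8_cons (a b : Int) (h : a < b) : PySem.List.pyRange a b 8 = a :: PySem.List.pyRange (a + 8) b 8 := by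
  rw [PySem.List.pyRange_of_pos a b (by norm_num), PySem.List.pyRange_of_pos (a+8) b (by norm_num)]
  have hcount : (if a < b then ((b - a + 8 - 1) / 8).toNat else 0)
      = (if a + 8 < b then ((b - (a+8) + 8 - 1) / 8).toNat else 0) + 1 := by
    split_ifs <;> omega
  rw [hcount, List.range_succ_eq_map]
  simp only [List.map_cons, List.map_map, Nat.cast_zero, mul_zero, add_zero]
  congr 1
  apply List.map_congr_left
  intro k _
  simp only [Function.comp]
  push_cast
  ring

-- pvH from a mid-chunk position (c+1) maps the next 7-c bytes with bits c, c+1, … then restarts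
theorem pvH_mid (t : List Int) : ∀ (c : Nat) (ms : Int), c < 7 →
    pvH (c+1) ms t
      = (PySem.List.enumerate (t.take (7 - c)) c).map
          (fun jb => pvMaskByte ms jb.2 jb.1.toNat) ++ pvH 0 0 (t.drop (7 - c)) := by
  induction t with
  | nil => intro c ms _; simp [pvH, PySem.List.enumerate_nil]
  | cons b t ih =>
    intro c ms hc
    have h7 : 7 - c = (6 - c) + 1 := by omega
    rw [h7]
    simp only [List.take_succ_cons, List.drop_succ_cons, PySem.List.enumerate_cons, List.map_cons]
    have hfix : ((c : Int)).toNat = c := by omega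
    rw [pvH]
    by_cases h6 : c < 6
    · have h2 : (c + 2) % 8 = (c + 1) + 1 := by omega
      rw [h2, ih (c+1) ms (by omega)]
      have h67 : 7 - (c+1) = 6 - c := by omega
      rw [h67, hfix]
      simp
    · have hc6 : c = 6 := by omega
      subst hc6
      rw [hfix]
      norm_num [PySem.List.enumerate_nil]
      exact pvH_zero_ms ms 0 t

theorem pvB_go (l : List Int) : ∀ (k : Nat) (acc : List Int),
    (PySem.List.pyRange (8 * k) l.length 8).foldl (pvBstep l) acc
      = acc ++ pvH 0 0 (l.drop (8 * k)) := by
  intro k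
  induction hd : l.length - 8 * k using Nat.strong_induction_on generalizing k with
  | _ d ih =>
    intro acc
    rw [show ((8:Int) * (k:Int)) = ((8 * k : Nat) : Int) by push_cast; ring]
    by_cases hlt : 8 * k < l.length
    · rw [pvRange8_cons _ _ (by exact_mod_cast hlt), List.foldl_cons]
      obtain ⟨m, t, hmt⟩ : ∃ m t, l.drop (8 * k) = m :: t := by
        cases hdrop : l.drop (8 * k) with
        | nil => exfalso; have := congrArg List.length hdrop; simp at this; omega
        | cons m t => exact ⟨m, t, rfl⟩
      have hstep : pvBstep l acc ((8 * k : Nat) : Int)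
          = acc ++ (PySem.List.enumerate (t.take 7) 0).map
              (fun jb =>
                if PySem.Int.band m ((1 : Int) <<< jb.1.toNat) ≠ 0 then PySem.Int.bor jb.2 128
                else jb.2) := by
        have hslice : PySem.List.slice l (some ((8 * k : Nat) : Int)) (some (((8 * k : Nat) : Int) + 8))
            = (l.drop (8 * k)).take 8 := by
          have := PySem.List.slice_natCast_add l (8 * k) 8
          simpa using this
        rw [pvBstep, hslice, hmt, List.take_succ_cons]
      rw [hstep]
      have hrec := ih (l.length - 8 * (k + 1)) (by omega) (k + 1) rfl
      rw [show ((8:Int) * ((k+1 : Nat) : Int)) = ((8 * k : Nat) : Int) + 8 by push_cast; ring] at hrec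
      rw [hrec]
      have hdrop8 : l.drop (8 * (k + 1)) = t.drop 7 := by
        rw [show 8 * (k+1) = 8 * k + 8 by ring, ← List.drop_drop, hmt]
        simp
      rw [hdrop8, hmt, List.append_assoc]
      congr 1
      have hm := pvH_mid t 0 m (by omega)
      simp only [Nat.sub_zero, Nat.cast_zero] at hm
      rw [pvH, hm]
      congr 1
      apply List.map_congr_left
      intro jb _
      simp only [pvMaskByte, Int.shiftLeft_natCast_right]
    · rw [pvRange8_nil _ _ (by exact_mod_cast Nat.le_of_not_lt (by omega))]
      rw [List.drop_eq_nil_of_le (by omega)]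
      simp [pvH]

theorem pvA_eq (l : List Int) : unpack_ms_bit l = pvH 0 0 l := by
  unfold unpack_ms_bit
  have := pvA_go l 0 0 0 [] (by omega) (by simp)
  simpa using this

theorem pvB_eq (l : List Int) : unpack_ms_bit_alt l = pvH 0 0 l := by
  unfold unpack_ms_bit_alt
  have := pvB_go l 0 []
  simpa using this

-- ===== VERDICT (by name: the statement is the Claim_ definition above) =====
theorem unpack_ms_bit_spec : Claim_equal_unpack_ms_bit := by
  intro l _
  unfold Spec_unpack_ms_bit
  rw [pvA_eq, pvB_eq]
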